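-- pv_equiv track=rewrite | github.com/X-lab-3D/PANDORA | PANDORA/modelling/modelling.py | allele_name_adapter
-- ===== SOURCE A (Python) =====
-- def allele_name_adapter(allele, allele_ID):
--     '''
--     Cuts the given allele name to make it consistent with the alleles in allele_ID.
--
--     Args:
--         allele(str) : Allele name
--         allele_ID(dict) : Dictionary of structure IDs (values) in the dataset for each allele (keys)
--     '''
--     #homolog_allele = '--NONE--'
--     for a in range(len(allele)):
--         if allele[a].startswith('HLA'):      # Human
--             if any(allele[a] in key for key in list(allele_ID.keys())):
--                 pass
--             elif any(allele[a][:8] in key for key in list(allele_ID.keys())):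
--                 allele[a] = allele[a][:8]
--             elif any(allele[a][:6] in key for key in list(allele_ID.keys())):
--                 allele[a] = allele[a][:6]
--             else:
--                 allele[a] = allele[a][:4]
--         elif allele[a].startswith('H2'):    # Mouse
--             #homolog_allele = 'RT1'
--             if any(allele[a] in key for key in list(allele_ID.keys())):
--                 pass
--             elif any(allele[a][:4] in key for key in list(allele_ID.keys())):
--                 allele[a] = allele[a][:4]
--             else:
--                 allele[a] = allele[a][:3]
--         elif allele[a].startswith('RT1'):          # Rat
--             #homolog_allele = 'H2'
--             if any(allele[a] in key for key in list(allele_ID.keys())):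
--                 pass
--             elif any(allele[a][:5] in key for key in list(allele_ID.keys())):
--                 allele[a] = allele[a][:5]
--             else:
--                 allele[a] = allele[a][:4]
--         elif allele[a].startswith('BoLA'):        # Bovine
--             if any(allele[a] in key for key in list(allele_ID.keys())):
--                 pass
--             elif any(allele[a][:10] in key for key in list(allele_ID.keys())):
--                 allele[a] = allele[a][:10]
--             elif any(allele[a][:7] in key for key in list(allele_ID.keys())):
--                 allele[a] = allele[a][:7]
--             else:
--                 allele[a] = allele[a][:5]
--         elif allele[a].startswith('SLA'):        # Suine
--             if any(allele[a] in key for key in list(allele_ID.keys())):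
--                 pass
--             elif any(allele[a][:9] in key for key in list(allele_ID.keys())):
--                 allele[a] = allele[a][:9]
--             elif any(allele[a][:6] in key for key in list(allele_ID.keys())):
--                 allele[a] = allele[a][:6]
--             else:
--                 allele[a] = allele[a][:4]
--         elif allele[a].startswith('MH1-B'):        # Chicken
--             if any(allele[a] in key for key in list(allele_ID.keys())):
--                 pass
--             elif any(allele[a][:8] in key for key in list(allele_ID.keys())):
--                 allele[a] = allele[a][:8]
--             else:
--                 allele[a] = allele[a][:6]
--         elif allele[a].startswith('BF2'):        # Chicken
--             if any(allele[a] in key for key in list(allele_ID.keys())):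
--                 pass
--             elif any(allele[a][:6] in key for key in list(allele_ID.keys())):
--                 allele[a] = allele[a][:6]
--             else:
--                 allele[a] = allele[a][:4]
--         elif allele[a].startswith('Mamu'):       # Monkey
--             if any(allele[a] in key for key in list(allele_ID.keys())):
--                 pass
--             elif any(allele[a][:13] in key for key in list(allele_ID.keys())):
--                 allele[a] = allele[a][:13]
--             elif any(allele[a][:9] in key for key in list(allele_ID.keys())):
--                 allele[a] = allele[a][:9]
--             else:
--                 allele[a] = allele[a][:5]
--         elif allele[a].startswith('Eqca'):        # Horse
--             if any(allele[a] in key for key in list(allele_ID.keys())):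
--                 pass
--             elif any(allele[a][:10] in key for key in list(allele_ID.keys())):
--                 allele[a] = allele[a][:10]
--             elif any(allele[a][:7] in key for key in list(allele_ID.keys())):
--                 allele[a] = allele[a][:7]
--             else:
--                 allele[a] = allele[a][:5]
--     return(allele)#, homolog_allele)
-- ===== SOURCE B (Python) =====
-- _TABLE = [('HLA', [8, 6, 4]), ('H2', [4, 3]), ('RT1', [5, 4]),
--           ('BoLA', [10, 7, 5]), ('SLA', [9, 6, 4]), ('MH1-B', [8, 6]),
--           ('BF2', [6, 4]), ('Mamu', [13, 9, 5]), ('Eqca', [10, 7, 5])]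
--
--
-- def allele_name_adapter(allele, allele_ID):
--     '''Different algorithm: instead of cascading substring tests per candidate,
--     compute for each name the length of its longest prefix occurring in any
--     dataset key, then pick the longest candidate cut not exceeding it
--     (arithmetic selection); mutates `allele` in place like the original.'''
--     for i, name in enumerate(allele):
--         lens = None
--         for pre, ls in _TABLE:
--             if name.startswith(pre):
--                 lens = ls
--                 break
--         if lens is None:
--             continue
--         # m = length of the longest prefix of `name` that is a substring of some key
--         m = 0
--         for key in allele_ID:
--             n = len(name)
--             while n and name[:n] not in key:
--                 n -= 1
--             m = max(m, n)
--         best = max((c for c in [len(name)] + lens[:-1] if c <= m), default=None)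
--         allele[i] = name[:best] if best is not None else name[:lens[-1]]
--     return allele
-- ===== Notes on version B (the rewrite author's own statement) =====
-- stated objective: alternative
-- what changed: Instead of A's nine per-species cascades of per-candidate substring tests, B computes for each name the length of its longest prefix occurring in any dataset key (one countdown scan per key) and then selects the cut arithmetically as the largest candidate length not exceeding it, falling back to the last table length; correct because a prefix of a substring is itself a substring, so matchability is monotone in the cut length.
import Mathlib
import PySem

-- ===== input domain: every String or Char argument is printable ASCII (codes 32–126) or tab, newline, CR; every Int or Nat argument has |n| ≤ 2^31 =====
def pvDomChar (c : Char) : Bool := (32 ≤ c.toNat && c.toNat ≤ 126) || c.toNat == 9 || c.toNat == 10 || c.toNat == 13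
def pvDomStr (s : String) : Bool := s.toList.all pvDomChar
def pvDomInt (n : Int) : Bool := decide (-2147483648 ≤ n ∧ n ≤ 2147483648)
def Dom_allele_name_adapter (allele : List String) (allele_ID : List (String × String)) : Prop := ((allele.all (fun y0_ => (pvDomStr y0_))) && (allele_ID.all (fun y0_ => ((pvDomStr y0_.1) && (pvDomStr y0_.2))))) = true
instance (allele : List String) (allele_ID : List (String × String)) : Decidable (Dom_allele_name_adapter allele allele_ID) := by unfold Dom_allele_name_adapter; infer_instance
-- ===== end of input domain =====

-- B replaces A's per-candidate substring-test cascades by computing, per name, the length of its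
-- longest prefix occurring in any dataset key and then picking the cut arithmetically (alternative
-- algorithm); both Pythons mutate `allele` in place — the equivalence proved is about the return value.

-- ===== PORT A =====
-- any(sub in key for key in list(allele_ID.keys()))
def pvKnownA (keys : List String) (sub : String) : Bool :=
  keys.any (fun k => PySem.Str.isIn sub k)

-- the body of A's loop for one element, elif chain in source order
def pvCutA (keys : List String) (s : String) : String :=
  if PySem.Str.startswith s "HLA" then
    if pvKnownA keys s then s
    else if pvKnownA keys (PySem.Str.slice s none (some 8)) then PySem.Str.slice s none (some 8)
    else if pvKnownA keys (PySem.Str.slice s none (some 6)) then PySem.Str.slice s none (some 6)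
    else PySem.Str.slice s none (some 4)
  else if PySem.Str.startswith s "H2" then
    if pvKnownA keys s then s
    else if pvKnownA keys (PySem.Str.slice s none (some 4)) then PySem.Str.slice s none (some 4)
    else PySem.Str.slice s none (some 3)
  else if PySem.Str.startswith s "RT1" then
    if pvKnownA keys s then s
    else if pvKnownA keys (PySem.Str.slice s none (some 5)) then PySem.Str.slice s none (some 5)
    else PySem.Str.slice s none (some 4)
  else if PySem.Str.startswith s "BoLA" then
    if pvKnownA keys s then s
    else if pvKnownA keys (PySem.Str.slice s none (some 10)) then PySem.Str.slice s none (some 10)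
    else if pvKnownA keys (PySem.Str.slice s none (some 7)) then PySem.Str.slice s none (some 7)
    else PySem.Str.slice s none (some 5)
  else if PySem.Str.startswith s "SLA" then
    if pvKnownA keys s then s
    else if pvKnownA keys (PySem.Str.slice s none (some 9)) then PySem.Str.slice s none (some 9)
    else if pvKnownA keys (PySem.Str.slice s none (some 6)) then PySem.Str.slice s none (some 6)
    else PySem.Str.slice s none (some 4)
  else if PySem.Str.startswith s "MH1-B" then
    if pvKnownA keys s then s
    else if pvKnownA keys (PySem.Str.slice s none (some 8)) then PySem.Str.slice s none (some 8)
    else PySem.Str.slice s none (some 6)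
  else if PySem.Str.startswith s "BF2" then
    if pvKnownA keys s then s
    else if pvKnownA keys (PySem.Str.slice s none (some 6)) then PySem.Str.slice s none (some 6)
    else PySem.Str.slice s none (some 4)
  else if PySem.Str.startswith s "Mamu" then
    if pvKnownA keys s then s
    else if pvKnownA keys (PySem.Str.slice s none (some 13)) then PySem.Str.slice s none (some 13)
    else if pvKnownA keys (PySem.Str.slice s none (some 9)) then PySem.Str.slice s none (some 9)
    else PySem.Str.slice s none (some 5)
  else if PySem.Str.startswith s "Eqca" then
    if pvKnownA keys s then s
    else if pvKnownA keys (PySem.Str.slice s none (some 10)) then PySem.Str.slice s none (some 10)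
    else if pvKnownA keys (PySem.Str.slice s none (some 7)) then PySem.Str.slice s none (some 7)
    else PySem.Str.slice s none (some 5)
  else s

def allele_name_adapter (allele : List String) (allele_ID : List (String × String)) : List String :=
  allele.map (pvCutA ((PySem.Dict.mk allele_ID).keys))

-- ===== PORT B =====
-- _TABLE: species prefix ↦ candidate cut lengths (last = unconditional fallback)
def pvTableB : List (String × List Nat) :=
  [("HLA", [8, 6, 4]), ("H2", [4, 3]), ("RT1", [5, 4]),
   ("BoLA", [10, 7, 5]), ("SLA", [9, 6, 4]), ("MH1-B", [8, 6]),
   ("BF2", [6, 4]), ("Mamu", [13, 9, 5]), ("Eqca", [10, 7, 5])]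

-- `n = len(name); while n and name[:n] not in key: n -= 1` — the slice name[:n] with a
-- nonnegative in-range bound is exactly List.take n (PySem.List.slice_to_natCast)
def pvLongestPrefIn (sL kL : List Char) : Nat → Nat
  | 0 => 0
  | n + 1 => if PySem.Chars.isIn (sL.take (n + 1)) kL then n + 1 else pvLongestPrefIn sL kL n

-- `m = 0; for key in allele_ID: … m = max(m, n)`
def pvM (keys : List String) (sL : List Char) : Nat :=
  keys.foldl (fun acc k => max acc (pvLongestPrefIn sL k.toList sL.length)) 0

-- the body of B's loop for one element
def pvCutB (keys : List String) (s : String) : String :=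
  match pvTableB.find? (fun row => PySem.Str.startswith s row.1) with
  | none => s
  | some row =>
      let L := s.toList.length
      let m := pvM keys s.toList
      -- best = max((c for c in [len(name)] + lens[:-1] if c <= m), default=None)
      match ((L :: row.2.dropLast).filter (fun c => c ≤ m)).max? with
      | some b => String.ofList (s.toList.take b)
      | none => String.ofList (s.toList.take row.2.getLast!)

def allele_name_adapter_alt (allele : List String) (allele_ID : List (String × String)) : List String :=
  allele.map (pvCutB ((PySem.Dict.mk allele_ID).keys))

-- ===== PRECONDITION & SPEC =====
def Spec_allele_name_adapter (allele : List String) (allele_ID : List (String × String)) (out : List String) : Prop := out = allele_name_adapter_alt allele allele_ID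
instance (allele : List String) (allele_ID : List (String × String)) (out : List String) : Decidable (Spec_allele_name_adapter allele allele_ID out) := by unfold Spec_allele_name_adapter; infer_instance

-- ===== CLAIM (what is proved, stated in full; the proofs are below) =====
def Claim_equal_allele_name_adapter : Prop := ∀ (allele : List String) (allele_ID : List (String × String)), Dom_allele_name_adapter allele allele_ID → Spec_allele_name_adapter allele allele_ID (allele_name_adapter allele allele_ID)

-- ===== LEMMAS AND PROOFS =====

-- proof-side abbreviation: "name[:n] is a substring of some key"
def pvKn (keys : List String) (sL : List Char) (n : Nat) : Bool :=
  keys.any (fun k => PySem.Chars.isIn (sL.take n) k.toList)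

theorem pv_isIn_take_mono (sL kL : List Char) {m n : Nat} (h : m ≤ n)
    (H : PySem.Chars.isIn (sL.take n) kL = true) : PySem.Chars.isIn (sL.take m) kL = true := by
  rw [PySem.Chars.isIn_iff_infix] at H ⊢
  have h1 : sL.take m = (sL.take n).take m := by
    rw [List.take_take, Nat.min_eq_left h]
  rw [h1]
  exact ((sL.take n).take_prefix m).isInfix.trans H

theorem pvLongestPrefIn_le (sL kL : List Char) (N : Nat) : pvLongestPrefIn sL kL N ≤ N := by
  induction N with
  | zero => simp [pvLongestPrefIn]
  | succ n ih => unfold pvLongestPrefIn; split <;> omega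

theorem pv_isIn_take_lpi (sL kL : List Char) (N : Nat) :
    PySem.Chars.isIn (sL.take (pvLongestPrefIn sL kL N)) kL = true := by
  induction N with
  | zero => simp only [pvLongestPrefIn, List.take_zero]; exact PySem.Chars.isIn_nil kL
  | succ n ih =>
      unfold pvLongestPrefIn
      split
      · assumption
      · exact ih

theorem pv_le_lpi (sL kL : List Char) {n N : Nat} (hn : n ≤ N)
    (H : PySem.Chars.isIn (sL.take n) kL = true) : n ≤ pvLongestPrefIn sL kL N := by
  induction N with
  | zero => omega
  | succ N ih =>
      unfold pvLongestPrefIn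
      split
      · omega
      · rename_i hne
        rcases Nat.lt_or_ge n (N + 1) with h | h
        · exact ih (by omega)
        · exact absurd (by rw [show n = N + 1 by omega] at H; exact H) (by simpa using hne)

theorem pv_isIn_take_iff (sL kL : List Char) {n N : Nat} (hn : n ≤ N) :
    PySem.Chars.isIn (sL.take n) kL = true ↔ n ≤ pvLongestPrefIn sL kL N := by
  constructor
  · exact pv_le_lpi sL kL hn
  · intro h
    exact pv_isIn_take_mono sL kL h (pv_isIn_take_lpi sL kL N)

theorem pv_foldl_max_init {α : Type} (f : α → Nat) (l : List α) (a : Nat) :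
    a ≤ l.foldl (fun acc x => max acc (f x)) a := by
  induction l generalizing a with
  | nil => simp
  | cons x t ih => exact le_trans (Nat.le_max_left a (f x)) (ih (max a (f x)))

theorem pv_foldl_max_mem {α : Type} (f : α → Nat) (l : List α) (a : Nat) {x : α} (hx : x ∈ l) :
    f x ≤ l.foldl (fun acc y => max acc (f y)) a := by
  induction l generalizing a with
  | nil => simp at hx
  | cons y t ih =>
      rcases List.mem_cons.mp hx with rfl | hx
      · exact le_trans (Nat.le_max_right a (f x)) (pv_foldl_max_init f t _)
      · exact ih _ hx

theorem pv_foldl_max_cases {α : Type} (f : α → Nat) (l : List α) (a : Nat) :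
    l.foldl (fun acc x => max acc (f x)) a = a ∨
      ∃ x ∈ l, l.foldl (fun acc x => max acc (f x)) a = f x := by
  induction l generalizing a with
  | nil => left; rfl
  | cons y t ih =>
      rcases ih (max a (f y)) with h | ⟨x, hx, h⟩
      · rcases Nat.le_total a (f y) with hy | hy
        · right
          refine ⟨y, List.mem_cons_self, ?_⟩
          simp only [List.foldl_cons]
          rw [h]
          exact Nat.max_eq_right hy
        · left
          simp only [List.foldl_cons]
          rw [h]
          exact Nat.max_eq_left hy
      · right
        refine ⟨x, List.mem_cons_of_mem _ hx, ?_⟩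
        simp only [List.foldl_cons]
        exact h

theorem pvM_le (keys : List String) (sL : List Char) : pvM keys sL ≤ sL.length := by
  unfold pvM
  rcases pv_foldl_max_cases (fun k : String => pvLongestPrefIn sL k.toList sL.length) keys 0
    with h | ⟨x, _, h⟩
  · omega
  · rw [h]; exact pvLongestPrefIn_le sL x.toList sL.length

-- the bridge: "name[:n] occurs in some key" ⇔ min n L ≤ m  (for n ≥ 1 on a nonempty name)
theorem pvKn_iff (keys : List String) (sL : List Char) {n : Nat} (hn : 1 ≤ n)
    (hL : 1 ≤ sL.length) :
    pvKn keys sL n = true ↔ min n sL.length ≤ pvM keys sL := by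
  have hcore : ∀ {j : Nat}, j ≤ sL.length → 1 ≤ j →
      (pvKn keys sL j = true ↔ j ≤ pvM keys sL) := by
    intro j hj hj1
    unfold pvKn pvM
    rw [List.any_eq_true]
    constructor
    · rintro ⟨k, hk, hIn⟩
      exact le_trans ((pv_isIn_take_iff sL k.toList hj).mp hIn)
        (pv_foldl_max_mem (fun k : String => pvLongestPrefIn sL k.toList sL.length) keys 0 hk)
    · intro h
      rcases pv_foldl_max_cases (fun k : String => pvLongestPrefIn sL k.toList sL.length) keys 0
        with h0 | ⟨k, hk, hkeq⟩
      · rw [h0] at h; omega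
      · rw [hkeq] at h
        exact ⟨k, hk, (pv_isIn_take_iff sL k.toList hj).mpr h⟩
  rcases Nat.le_total n sL.length with h | h
  · rw [Nat.min_eq_left h]
    exact hcore h hn
  · have heq : sL.take n = sL.take sL.length := by
      rw [List.take_length, List.take_of_length_le h]
    rw [Nat.min_eq_right h]
    unfold pvKn
    rw [heq]
    exact hcore (le_refl _) hL

theorem pv_sel3 (keys : List String) (s : String) (l1 l2 l3 : Nat)
    (h3 : 1 ≤ l3) (h32 : l3 < l2) (h21 : l2 < l1) (hL : 1 ≤ s.toList.length) :
    (if pvKn keys s.toList s.toList.length then s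
     else if pvKn keys s.toList l1 then String.ofList (s.toList.take l1)
     else if pvKn keys s.toList l2 then String.ofList (s.toList.take l2)
     else String.ofList (s.toList.take l3))
    =
    (match ((s.toList.length :: [l1, l2]).filter (fun c => c ≤ pvM keys s.toList)).max? with
     | some b => String.ofList (s.toList.take b)
     | none => String.ofList (s.toList.take l3)) := by
  have hM := pvM_le keys s.toList
  set sL := s.toList with hsL
  set L := sL.length with hLdef
  set M := pvM keys sL with hMdef
  have hs : s = String.ofList (sL.take L) := by
    rw [List.take_length, hsL, String.ofList_toList]
  by_cases c1 : L ≤ M <;> by_cases c2 : l1 ≤ M <;> by_cases c3 : l2 ≤ M <;>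
    simp only [List.filter_cons, List.filter_nil, decide_eq_true_eq, c1, c2, c3,
      if_true, if_false, List.max?_cons', List.foldl_cons, List.foldl_nil,
      List.max?_nil] <;>
    rw [hs] <;>
    simp only [pvKn_iff keys sL (n := L) (by omega) hL, pvKn_iff keys sL (n := l1) (by omega) hL,
      pvKn_iff keys sL (n := l2) (by omega) hL] <;>
    split_ifs <;>
    first
      | rfl
      | (apply congrArg String.ofList; rw [List.take_eq_take_iff]; omega)

theorem pv_sel2 (keys : List String) (s : String) (l1 l2 : Nat)
    (h2 : 1 ≤ l2) (h21 : l2 < l1) (hL : 1 ≤ s.toList.length) :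
    (if pvKn keys s.toList s.toList.length then s
     else if pvKn keys s.toList l1 then String.ofList (s.toList.take l1)
     else String.ofList (s.toList.take l2))
    =
    (match ((s.toList.length :: [l1]).filter (fun c => c ≤ pvM keys s.toList)).max? with
     | some b => String.ofList (s.toList.take b)
     | none => String.ofList (s.toList.take l2)) := by
  have hM := pvM_le keys s.toList
  set sL := s.toList with hsL
  set L := sL.length with hLdef
  set M := pvM keys sL with hMdef
  have hs : s = String.ofList (sL.take L) := by
    rw [List.take_length, hsL, String.ofList_toList]
  by_cases c1 : L ≤ M <;> by_cases c2 : l1 ≤ M <;>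
    simp only [List.filter_cons, List.filter_nil, decide_eq_true_eq, c1, c2,
      if_true, if_false, List.max?_cons', List.foldl_cons, List.foldl_nil,
      List.max?_nil] <;>
    rw [hs] <;>
    simp only [pvKn_iff keys sL (n := L) (by omega) hL, pvKn_iff keys sL (n := l1) (by omega) hL] <;>
    split_ifs <;>
    first
      | rfl
      | (apply congrArg String.ofList; rw [List.take_eq_take_iff]; omega)

theorem pvKnownA_full (keys : List String) (s : String) :
    pvKnownA keys s = pvKn keys s.toList s.toList.length := by
  unfold pvKn
  rw [List.take_length]
  simp [pvKnownA, pysem]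

theorem pvKnownA_slice (keys : List String) (s : String) (i : Int) (h : 0 ≤ i) :
    pvKnownA keys (PySem.Str.slice s none (some i)) = pvKn keys s.toList i.toNat := by
  simp [pvKnownA, pvKn, pysem, PySem.List.slice_to s.toList h]

theorem pv_slice_ofList (s : String) (i : Int) (h : 0 ≤ i) :
    PySem.Str.slice s none (some i) = String.ofList (s.toList.take i.toNat) := by
  simp [PySem.Str.slice, pysem, PySem.List.slice_to s.toList h]

theorem pv_len_ge (s p : String) (h : PySem.Str.startswith s p = true) :
    p.toList.length ≤ s.toList.length := by
  have h2 : PySem.Chars.startswith s.toList p.toList = true := by simp only [← h]; simp [pysem]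
  exact ((PySem.Chars.startswith_iff _ _).mp h2).length_le

theorem pvCut_eq (keys : List String) (s : String) : pvCutA keys s = pvCutB keys s := by
  unfold pvCutA pvCutB
  by_cases h1 : PySem.Str.startswith s "HLA" = true
  · simp only [pvTableB, List.find?, h1, if_true]
    have hL : 1 ≤ s.toList.length := le_trans (by decide) (pv_len_ge s "HLA" h1)
    rw [pvKnownA_full, pvKnownA_slice keys s 8 (by norm_num), pvKnownA_slice keys s 6 (by norm_num), pv_slice_ofList s 8 (by norm_num), pv_slice_ofList s 6 (by norm_num), pv_slice_ofList s 4 (by norm_num)]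
    simp only [show (((4 : Int)).toNat = 4) from rfl, show (((6 : Int)).toNat = 6) from rfl, show (((8 : Int)).toNat = 8) from rfl]
    exact pv_sel3 keys s 8 6 4 (by norm_num) (by norm_num) (by norm_num) hL
  rw [Bool.not_eq_true] at h1
  by_cases h2 : PySem.Str.startswith s "H2" = true
  · simp only [pvTableB, List.find?, h1, h2, Bool.false_eq_true, if_true, if_false]
    have hL : 1 ≤ s.toList.length := le_trans (by decide) (pv_len_ge s "H2" h2)
    rw [pvKnownA_full, pvKnownA_slice keys s 4 (by norm_num), pv_slice_ofList s 4 (by norm_num), pv_slice_ofList s 3 (by norm_num)]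
    simp only [show (((3 : Int)).toNat = 3) from rfl, show (((4 : Int)).toNat = 4) from rfl]
    exact pv_sel2 keys s 4 3 (by norm_num) (by norm_num) hL
  rw [Bool.not_eq_true] at h2
  by_cases h3 : PySem.Str.startswith s "RT1" = true
  · simp only [pvTableB, List.find?, h1, h2, h3, Bool.false_eq_true, if_true, if_false]
    have hL : 1 ≤ s.toList.length := le_trans (by decide) (pv_len_ge s "RT1" h3)
    rw [pvKnownA_full, pvKnownA_slice keys s 5 (by norm_num), pv_slice_ofList s 5 (by norm_num), pv_slice_ofList s 4 (by norm_num)]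
    simp only [show (((4 : Int)).toNat = 4) from rfl, show (((5 : Int)).toNat = 5) from rfl]
    exact pv_sel2 keys s 5 4 (by norm_num) (by norm_num) hL
  rw [Bool.not_eq_true] at h3
  by_cases h4 : PySem.Str.startswith s "BoLA" = true
  · simp only [pvTableB, List.find?, h1, h2, h3, h4, Bool.false_eq_true, if_true, if_false]
    have hL : 1 ≤ s.toList.length := le_trans (by decide) (pv_len_ge s "BoLA" h4)
    rw [pvKnownA_full, pvKnownA_slice keys s 10 (by norm_num), pvKnownA_slice keys s 7 (by norm_num), pv_slice_ofList s 10 (by norm_num), pv_slice_ofList s 7 (by norm_num), pv_slice_ofList s 5 (by norm_num)]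
    simp only [show (((5 : Int)).toNat = 5) from rfl, show (((7 : Int)).toNat = 7) from rfl, show (((10 : Int)).toNat = 10) from rfl]
    exact pv_sel3 keys s 10 7 5 (by norm_num) (by norm_num) (by norm_num) hL
  rw [Bool.not_eq_true] at h4
  by_cases h5 : PySem.Str.startswith s "SLA" = true
  · simp only [pvTableB, List.find?, h1, h2, h3, h4, h5, Bool.false_eq_true, if_true, if_false]
    have hL : 1 ≤ s.toList.length := le_trans (by decide) (pv_len_ge s "SLA" h5)
    rw [pvKnownA_full, pvKnownA_slice keys s 9 (by norm_num), pvKnownA_slice keys s 6 (by norm_num), pv_slice_ofList s 9 (by norm_num), pv_slice_ofList s 6 (by norm_num), pv_slice_ofList s 4 (by norm_num)]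
    simp only [show (((4 : Int)).toNat = 4) from rfl, show (((6 : Int)).toNat = 6) from rfl, show (((9 : Int)).toNat = 9) from rfl]
    exact pv_sel3 keys s 9 6 4 (by norm_num) (by norm_num) (by norm_num) hL
  rw [Bool.not_eq_true] at h5
  by_cases h6 : PySem.Str.startswith s "MH1-B" = true
  · simp only [pvTableB, List.find?, h1, h2, h3, h4, h5, h6, Bool.false_eq_true, if_true, if_false]
    have hL : 1 ≤ s.toList.length := le_trans (by decide) (pv_len_ge s "MH1-B" h6)
    rw [pvKnownA_full, pvKnownA_slice keys s 8 (by norm_num), pv_slice_ofList s 8 (by norm_num), pv_slice_ofList s 6 (by norm_num)]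
    simp only [show (((6 : Int)).toNat = 6) from rfl, show (((8 : Int)).toNat = 8) from rfl]
    exact pv_sel2 keys s 8 6 (by norm_num) (by norm_num) hL
  rw [Bool.not_eq_true] at h6
  by_cases h7 : PySem.Str.startswith s "BF2" = true
  · simp only [pvTableB, List.find?, h1, h2, h3, h4, h5, h6, h7, Bool.false_eq_true, if_true, if_false]
    have hL : 1 ≤ s.toList.length := le_trans (by decide) (pv_len_ge s "BF2" h7)
    rw [pvKnownA_full, pvKnownA_slice keys s 6 (by norm_num), pv_slice_ofList s 6 (by norm_num), pv_slice_ofList s 4 (by norm_num)]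
    simp only [show (((4 : Int)).toNat = 4) from rfl, show (((6 : Int)).toNat = 6) from rfl]
    exact pv_sel2 keys s 6 4 (by norm_num) (by norm_num) hL
  rw [Bool.not_eq_true] at h7
  by_cases h8 : PySem.Str.startswith s "Mamu" = true
  · simp only [pvTableB, List.find?, h1, h2, h3, h4, h5, h6, h7, h8, Bool.false_eq_true, if_true, if_false]
    have hL : 1 ≤ s.toList.length := le_trans (by decide) (pv_len_ge s "Mamu" h8)
    rw [pvKnownA_full, pvKnownA_slice keys s 13 (by norm_num), pvKnownA_slice keys s 9 (by norm_num), pv_slice_ofList s 13 (by norm_num), pv_slice_ofList s 9 (by norm_num), pv_slice_ofList s 5 (by norm_num)]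
    simp only [show (((5 : Int)).toNat = 5) from rfl, show (((9 : Int)).toNat = 9) from rfl, show (((13 : Int)).toNat = 13) from rfl]
    exact pv_sel3 keys s 13 9 5 (by norm_num) (by norm_num) (by norm_num) hL
  rw [Bool.not_eq_true] at h8
  by_cases h9 : PySem.Str.startswith s "Eqca" = true
  · simp only [pvTableB, List.find?, h1, h2, h3, h4, h5, h6, h7, h8, h9, Bool.false_eq_true, if_true, if_false]
    have hL : 1 ≤ s.toList.length := le_trans (by decide) (pv_len_ge s "Eqca" h9)
    rw [pvKnownA_full, pvKnownA_slice keys s 10 (by norm_num), pvKnownA_slice keys s 7 (by norm_num), pv_slice_ofList s 10 (by norm_num), pv_slice_ofList s 7 (by norm_num), pv_slice_ofList s 5 (by norm_num)]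
    simp only [show (((5 : Int)).toNat = 5) from rfl, show (((7 : Int)).toNat = 7) from rfl, show (((10 : Int)).toNat = 10) from rfl]
    exact pv_sel3 keys s 10 7 5 (by norm_num) (by norm_num) (by norm_num) hL
  rw [Bool.not_eq_true] at h9
  simp only [pvTableB, List.find?, h1, h2, h3, h4, h5, h6, h7, h8, h9, Bool.false_eq_true, reduceIte]

-- ===== VERDICT (by name: the statement is the Claim_ definition above) =====
theorem allele_name_adapter_spec : Claim_equal_allele_name_adapter := by
  intro allele allele_ID _
  unfold Spec_allele_name_adapter allele_name_adapter allele_name_adapter_alt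
  exact List.map_congr_left (fun s _ => pvCut_eq _ s)
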